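-- pv_equiv track=rewrite | github.com/maiziex/AncestralCall | bin/Evaluate_derived_sv_by_flankingseq_align_for_ins.py | check_clipping_not_in_the_end
-- ===== SOURCE A (Python) =====
-- def check_clipping_not_in_the_end(cigar):
--     flag = 0
--     if "H" not in cigar and "S" not in cigar:
--         flag = 1
--     else:
--         cigar_len = len(cigar)
--         cigar_list = []
--         num_string = ""
--         for i in range(cigar_len):
--             letter = cigar[i]
--             if letter.isalpha():
--                 cigar_list.append(num_string)
--                 num_string = ""
--                 cigar_list.append(letter)
--             else:
--                 num_string += letter
--         if cigar_list[-1] == "S" or cigar_list[-1] == "H":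
--             flag = 0
--         else:
--             flag = 1
--     return flag
-- ===== SOURCE B (Python) =====
-- def check_clipping_not_in_the_end(cigar):
--     for ch in reversed(cigar):
--         if ch.isalpha():
--             return 0 if ch in "SH" else 1
--     return 1
-- ===== Notes on version B (the rewrite author's own statement) =====
-- stated objective: simpler
-- what changed: Replaced A's substring pre-check plus full forward tokenization into a list with a single backward early-exiting scan that inspects only the last alphabetic character.
import Mathlib
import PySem

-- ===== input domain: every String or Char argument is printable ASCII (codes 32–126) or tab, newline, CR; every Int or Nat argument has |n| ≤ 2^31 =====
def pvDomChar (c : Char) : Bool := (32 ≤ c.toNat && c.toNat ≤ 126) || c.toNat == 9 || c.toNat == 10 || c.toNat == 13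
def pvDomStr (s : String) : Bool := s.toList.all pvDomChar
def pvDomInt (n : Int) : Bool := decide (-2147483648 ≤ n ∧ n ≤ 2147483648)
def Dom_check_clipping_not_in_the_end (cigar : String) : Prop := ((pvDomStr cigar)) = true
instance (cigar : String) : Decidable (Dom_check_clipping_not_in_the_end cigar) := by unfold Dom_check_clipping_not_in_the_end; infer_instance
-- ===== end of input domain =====

-- ===== PORT A =====
-- Header: B replaces A's membership pre-check + full forward tokenization by a single
-- backward early-exit scan of the cigar string (simpler); same return value everywhere.
-- Loop body of A: tokens kept as List Char (Python strings), state = (cigar_list, num_string).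
def pvA_step (st : List (List Char) × List Char) (c : Char) : List (List Char) × List Char :=
  if PySem.Chars.isalpha c then (st.1 ++ [st.2, [c]], [])
  else (st.1, st.2 ++ [c])

def check_clipping_not_in_the_end (cigar : String) : Int :=
  if PySem.Str.isIn "H" cigar = false ∧ PySem.Str.isIn "S" cigar = false then 1
  else
    let st := cigar.toList.foldl pvA_step ([], [])
    match PySem.List.pyGet? st.1 (-1) with
    | some t => if t = ['S'] ∨ t = ['H'] then 0 else 1
    | none => 0  -- unreachable: 'H' or 'S' occurs in cigar, so an alpha char was appended


-- ===== PORT B =====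
def pvB_scan : List Char → Int
  | [] => 1
  | c :: rest => if PySem.Chars.isalpha c then (if c = 'S' ∨ c = 'H' then 0 else 1) else pvB_scan rest

def check_clipping_not_in_the_end_alt (cigar : String) : Int :=
  pvB_scan cigar.toList.reverse


-- ===== PRECONDITION & SPEC =====
def Spec_check_clipping_not_in_the_end (cigar : String) (out : Int) : Prop := out = check_clipping_not_in_the_end_alt cigar
instance (cigar : String) (out : Int) : Decidable (Spec_check_clipping_not_in_the_end cigar out) := by unfold Spec_check_clipping_not_in_the_end; infer_instance

-- ===== CLAIM (what is proved, stated in full; the proofs are below) =====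
def Claim_equal_check_clipping_not_in_the_end : Prop := ∀ (cigar : String), Dom_check_clipping_not_in_the_end cigar → Spec_check_clipping_not_in_the_end cigar (check_clipping_not_in_the_end cigar)

-- ===== LEMMAS AND PROOFS =====

-- B's backward scan computes the first alpha char of the (reversed) list.
theorem pvB_scan_eq_find (r : List Char) :
    pvB_scan r = match r.find? PySem.Chars.isalpha with
      | none => 1
      | some c => if c = 'S' ∨ c = 'H' then 0 else 1 := by
  induction r with
  | nil => rfl
  | cons c rest ih =>
    by_cases h : PySem.Chars.isalpha c
    · simp [pvB_scan, List.find?, h]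
    · simp only [pvB_scan, List.find?, h]
      simp only [Bool.not_eq_true] at h
      simp [ih]

-- A's tokenizing loop: the last element of cigar_list is the last alpha char (as a
-- one-char token); if no alpha char was seen, cigar_list is the initial accumulator.
theorem pvA_loop_last (l : List Char) (acc : List (List Char)) (num : List Char) :
    PySem.List.pyGet? (l.foldl pvA_step (acc, num)).1 (-1) =
      match l.reverse.find? PySem.Chars.isalpha with
      | some c => some [c]
      | none => PySem.List.pyGet? acc (-1) := by
  induction l generalizing acc num with
  | nil => simp
  | cons c rest ih =>
    simp only [List.foldl_cons, List.reverse_cons, List.find?_append]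
    by_cases h : PySem.Chars.isalpha c
    · simp only [pvA_step, if_pos h]
      rw [ih]
      cases hr : rest.reverse.find? PySem.Chars.isalpha with
      | some c' => simp
      | none =>
        have hacc : acc ++ [num, [c]] = (acc ++ [num]) ++ [[c]] := by simp
        rw [hacc, PySem.List.pyGet?_neg_one_append_singleton]
        simp [List.find?, h]
    · simp only [pvA_step, if_neg h]
      rw [ih]
      cases hr : rest.reverse.find? PySem.Chars.isalpha with
      | some c' => simp
      | none =>
        simp only [Bool.not_eq_true] at h
        simp [List.find?, h]

-- a false membership test rules the char out of the list
theorem pv_not_mem_of_isIn_false (cigar : String) (c : Char)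
    (h : PySem.Str.isIn (String.ofList [c]) cigar = false) : c ∉ cigar.toList := by
  intro hm
  have h2 : PySem.Str.isIn (String.ofList [c]) cigar = true :=
    (PySem.Str.isIn_iff_infix _ cigar).2
      (by rw [String.toList_ofList]; exact (List.singleton_infix_iff c cigar.toList).2 hm)
  rw [h] at h2
  exact Bool.noConfusion h2

theorem pv_mem_of_isIn_true (cigar : String) (c : Char)
    (h : PySem.Str.isIn (String.ofList [c]) cigar = true) : c ∈ cigar.toList := by
  have := (PySem.Str.isIn_iff_infix _ cigar).1 h
  exact (List.singleton_infix_iff c cigar.toList).1 (by rwa [String.toList_ofList] at this)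

-- ===== VERDICT (by name: the statement is the Claim_ definition above) =====
theorem check_clipping_not_in_the_end_spec : Claim_equal_check_clipping_not_in_the_end := by
  intro cigar _
  unfold Spec_check_clipping_not_in_the_end check_clipping_not_in_the_end
    check_clipping_not_in_the_end_alt
  rw [pvB_scan_eq_find]
  by_cases hg : PySem.Str.isIn "H" cigar = false ∧ PySem.Str.isIn "S" cigar = false
  · rw [if_pos hg]
    have hH : 'H' ∉ cigar.toList := pv_not_mem_of_isIn_false cigar 'H' hg.1
    have hS : 'S' ∉ cigar.toList := pv_not_mem_of_isIn_false cigar 'S' hg.2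
    cases hf : cigar.toList.reverse.find? PySem.Chars.isalpha with
    | none => rfl
    | some c =>
      have hcmem : c ∈ cigar.toList := by
        have := List.mem_of_find?_eq_some hf; simpa using this
      have hcS : c ≠ 'S' := fun h => hS (h ▸ hcmem)
      have hcH : c ≠ 'H' := fun h => hH (h ▸ hcmem)
      simp [hcS, hcH]
  · rw [if_neg hg]
    have halpha : ∃ x ∈ cigar.toList.reverse, PySem.Chars.isalpha x = true := by
      rcases Decidable.not_and_iff_not_or_not.1 hg with h | h
      · have hm : 'H' ∈ cigar.toList := by
          apply pv_mem_of_isIn_true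
          cases hb : PySem.Str.isIn "H" cigar with
          | false => exact absurd hb h
          | true => rfl
        exact ⟨'H', by simpa using hm, by decide⟩
      · have hm : 'S' ∈ cigar.toList := by
          apply pv_mem_of_isIn_true
          cases hb : PySem.Str.isIn "S" cigar with
          | false => exact absurd hb h
          | true => rfl
        exact ⟨'S', by simpa using hm, by decide⟩
    have hsome : (cigar.toList.reverse.find? PySem.Chars.isalpha).isSome := by
      rw [List.find?_isSome]; exact halpha
    show (match PySem.List.pyGet? (cigar.toList.foldl pvA_step ([], [])).1 (-1) with
          | some t => if t = ['S'] ∨ t = ['H'] then (0 : Int) else 1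
          | none => 0) = _
    rw [pvA_loop_last]
    cases hf : cigar.toList.reverse.find? PySem.Chars.isalpha with
    | none => rw [hf] at hsome; exact Bool.noConfusion hsome
    | some c => simp
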